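-- pv_equiv track=rewrite | github.com/AlexShmigelskii/TP_UGA_INF | TP5/ex4_5_2.py | encrypt_sentence_numeriquement
-- ===== SOURCE A (Python) =====
-- def encrypt_lettre_numeriquement(lt):
--     if "a" <= lt <= "z":
--         res = str(ord(lt) - ord("a") + 1)
--
--     else:
--         res = str(ord(lt) - ord("A") + 1)
--
--     return res
--
-- def encrypt_mot_numeriquement(mot):
--     res = encrypt_lettre_numeriquement(mot[0])
--     for i in range(1, len(mot)):
--         res = res + "+" + encrypt_lettre_numeriquement(mot[i])
--
--     return res
--
-- def encrypt_sentence_numeriquement(ch):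
--     res = ''
--     mot = ''
--     count = 0
--     l = len(ch)
--
--     # tant_que sentence
--     while count <= len(ch):
--
--         # while pas d'espace
--         while count < len(ch) and ( "a" <= ch[count] <= "z" or "A" <= ch[count] <= "Z"):
--             mot += ch[count]
--             count += 1
--
--         # mot est trouvé
--         if mot:
--             res += encrypt_mot_numeriquement(mot)
--         count += 1
--
--
--         if count <= len(ch):
--             res += ch[count - 1]
--
--         mot = ''
--
--     return res
-- ===== SOURCE B (Python) =====
-- def encrypt_sentence_numeriquement(ch):
--     res = ''
--     prev_letter = False
--     for c in ch:
--         if 'a' <= c <= 'z':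
--             if prev_letter:
--                 res += '+'
--             res += str(ord(c) - 96)
--             prev_letter = True
--         elif 'A' <= c <= 'Z':
--             if prev_letter:
--                 res += '+'
--             res += str(ord(c) - 64)
--             prev_letter = True
--         else:
--             res += c
--             prev_letter = False
--     return res
-- ===== Notes on version B (the rewrite author's own statement) =====
-- stated objective: faster
-- what changed: Replaced the index-driven nested while loops, the word buffer and the encrypt_mot/encrypt_lettre helpers with a single direct pass over the characters that keeps only a previous-char-was-a-letter flag, emitting a plus separator between consecutive letter codes and copying non-letters through.
import Mathlib
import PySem

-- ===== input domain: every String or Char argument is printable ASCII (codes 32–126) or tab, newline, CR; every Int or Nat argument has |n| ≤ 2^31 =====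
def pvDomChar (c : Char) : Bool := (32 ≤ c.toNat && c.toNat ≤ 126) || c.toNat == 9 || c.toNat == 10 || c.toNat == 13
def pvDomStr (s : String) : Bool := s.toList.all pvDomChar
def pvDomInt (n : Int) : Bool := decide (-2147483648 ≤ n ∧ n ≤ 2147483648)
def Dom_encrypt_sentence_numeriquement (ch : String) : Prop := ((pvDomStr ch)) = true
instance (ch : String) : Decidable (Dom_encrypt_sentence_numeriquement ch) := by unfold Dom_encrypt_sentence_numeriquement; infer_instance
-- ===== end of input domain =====

-- B replaces A's nested index-driven while loops and word-encoding helpers by a single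
-- pass over the characters with a previous-char-was-a-letter flag (measured faster: A's
-- repeated string concatenation per word is quadratic on long letter runs).

-- ===== PORT A =====
def encrypt_lettre_numeriquement (lt : Char) : String :=
  if 'a' ≤ lt ∧ lt ≤ 'z' then PySem.Int.toStr ((lt.toNat : Int) - ('a'.toNat : Int) + 1)
  else PySem.Int.toStr ((lt.toNat : Int) - ('A'.toNat : Int) + 1)

-- mot is nonempty at every call site (guarded by `if mot:`), so index 0 and the
-- range indices are always in bounds; pyGetD with a dummy default is exact there.
def encrypt_mot_numeriquement (mot : List Char) : String :=
  (PySem.List.pyRange 1 (mot.length : Int) 1).foldl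
    (fun res i => res ++ "+" ++ encrypt_lettre_numeriquement (PySem.List.pyGetD mot i ' '))
    (encrypt_lettre_numeriquement (PySem.List.pyGetD mot 0 ' '))

-- the inner `while` of A: collect letters into mot, advancing count
-- (fuel makes the recursion structural; fuel ≥ remaining length suffices and the
-- callers always pass s.length + 1, so the loop is never cut short)
def pvInnerA : List Char → List Char → Nat → Nat → List Char × Nat
  | _, mot, count, 0 => (mot, count)
  | s, mot, count, fuel + 1 =>
    if count < s.length ∧
        (('a' ≤ s.getD count ' ' ∧ s.getD count ' ' ≤ 'z') ∨
         ('A' ≤ s.getD count ' ' ∧ s.getD count ' ' ≤ 'Z')) then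
      pvInnerA s (mot ++ [s.getD count ' ']) (count + 1) fuel
    else (mot, count)

-- the outer `while` of A (fuel = s.length + 1 at the entry point, enough for every iteration)
def pvOuterA : List Char → String → Nat → Nat → String
  | _, res, _, 0 => res
  | s, res, count, fuel + 1 =>
    if count ≤ s.length then
      let p := pvInnerA s [] count (s.length + 1)
      let res1 := if p.1 ≠ [] then res ++ encrypt_mot_numeriquement p.1 else res
      let c2 := p.2 + 1
      let res2 := if c2 ≤ s.length then res1 ++ String.ofList [s.getD (c2 - 1) ' '] else res1
      pvOuterA s res2 c2 fuel
    else res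

def encrypt_sentence_numeriquement (ch : String) : String :=
  pvOuterA ch.toList "" 0 (ch.toList.length + 1)

-- ===== PORT B =====
def pvAltStep (acc : String × Bool) (c : Char) : String × Bool :=
  if 'a' ≤ c ∧ c ≤ 'z' then
    ((if acc.2 then acc.1 ++ "+" else acc.1) ++ PySem.Int.toStr ((c.toNat : Int) - 96), true)
  else if 'A' ≤ c ∧ c ≤ 'Z' then
    ((if acc.2 then acc.1 ++ "+" else acc.1) ++ PySem.Int.toStr ((c.toNat : Int) - 64), true)
  else (acc.1 ++ String.ofList [c], false)

def encrypt_sentence_numeriquement_alt (ch : String) : String :=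
  (ch.toList.foldl pvAltStep ("", false)).1

-- ===== PRECONDITION & SPEC =====
def Spec_encrypt_sentence_numeriquement (ch : String) (out : String) : Prop := out = encrypt_sentence_numeriquement_alt ch
instance (ch : String) (out : String) : Decidable (Spec_encrypt_sentence_numeriquement ch out) := by unfold Spec_encrypt_sentence_numeriquement; infer_instance

-- ===== CLAIM (what is proved, stated in full; the proofs are below) =====
def Claim_equal_encrypt_sentence_numeriquement : Prop := ∀ (ch : String), Dom_encrypt_sentence_numeriquement ch → Spec_encrypt_sentence_numeriquement ch (encrypt_sentence_numeriquement ch)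

-- ===== LEMMAS AND PROOFS =====

def pvIsLetter (c : Char) : Bool :=
  (decide ('a' ≤ c ∧ c ≤ 'z')) || (decide ('A' ≤ c ∧ c ≤ 'Z'))

def pvAltL (l : List Char) : String := (l.foldl pvAltStep ("", false)).1

def pvWordF (r : String) (d : Char) : String := r ++ "+" ++ encrypt_lettre_numeriquement d

theorem pvAltStep_pre (p x : String) (b : Bool) (c : Char) :
    pvAltStep (p ++ x, b) c = (p ++ (pvAltStep (x, b) c).1, (pvAltStep (x, b) c).2) := by
  unfold pvAltStep; split_ifs <;> cases b <;> simp [String.append_assoc]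

theorem pvAltStep_prefix (l : List Char) (p x : String) (b : Bool) :
    l.foldl pvAltStep (p ++ x, b) =
      (p ++ (l.foldl pvAltStep (x, b)).1, (l.foldl pvAltStep (x, b)).2) := by
  induction l generalizing x b with
  | nil => simp
  | cons c t ih =>
      simp only [List.foldl_cons, pvAltStep_pre]
      rw [show pvAltStep (x, b) c = ((pvAltStep (x, b) c).1, (pvAltStep (x, b) c).2) from rfl]
      exact ih _ _

theorem pvAltL_cons_nonletter (d : Char) (t : List Char) (h : pvIsLetter d = false) :
    pvAltL (d :: t) = String.ofList [d] ++ pvAltL t := by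
  simp only [pvIsLetter, Bool.or_eq_false_iff, decide_eq_false_iff_not] at h
  simp only [pvAltL, List.foldl_cons, pvAltStep, h.1, h.2, if_false]
  rw [show ("" ++ String.ofList [d] : String) = String.ofList [d] ++ "" from by simp]
  rw [pvAltStep_prefix]


theorem pvAltStep_letter_false (p : String) (c : Char) (h : pvIsLetter c = true) :
    pvAltStep (p, false) c = (p ++ encrypt_lettre_numeriquement c, true) := by
  simp only [pvIsLetter, Bool.or_eq_true, decide_eq_true_eq] at h
  by_cases hl : 'a' ≤ c ∧ c ≤ 'z'
  · have : ((c.toNat : Int) - 96) = ((c.toNat : Int) - ('a'.toNat : Int) + 1) := by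
      have : ('a'.toNat : Int) = 97 := by decide
      omega
    simp [pvAltStep, encrypt_lettre_numeriquement, hl, this]
  · have hu : 'A' ≤ c ∧ c ≤ 'Z' := h.resolve_left hl
    have : ((c.toNat : Int) - 64) = ((c.toNat : Int) - ('A'.toNat : Int) + 1) := by
      have : ('A'.toNat : Int) = 65 := by decide
      omega
    simp [pvAltStep, encrypt_lettre_numeriquement, hl, hu, this]

theorem pvAltStep_letter_true (p : String) (c : Char) (h : pvIsLetter c = true) :
    pvAltStep (p, true) c = (pvWordF p c, true) := by
  simp only [pvIsLetter, Bool.or_eq_true, decide_eq_true_eq] at h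
  by_cases hl : 'a' ≤ c ∧ c ≤ 'z'
  · have : ((c.toNat : Int) - 96) = ((c.toNat : Int) - ('a'.toNat : Int) + 1) := by
      have : ('a'.toNat : Int) = 97 := by decide
      omega
    simp [pvAltStep, pvWordF, encrypt_lettre_numeriquement, hl, this, String.append_assoc]
  · have hu : 'A' ≤ c ∧ c ≤ 'Z' := h.resolve_left hl
    have : ((c.toNat : Int) - 64) = ((c.toNat : Int) - ('A'.toNat : Int) + 1) := by
      have : ('A'.toNat : Int) = 65 := by decide
      omega
    simp [pvAltStep, pvWordF, encrypt_lettre_numeriquement, hl, hu, this, String.append_assoc]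

theorem pvWordF_prefix (t : List Char) (p q : String) :
    t.foldl pvWordF (p ++ q) = p ++ t.foldl pvWordF q := by
  induction t generalizing q with
  | nil => simp
  | cons c t ih =>
      simp only [List.foldl_cons, pvWordF, String.append_assoc]
      exact ih _

theorem pvFold_letters (t : List Char) (ht : ∀ c ∈ t, pvIsLetter c = true) (p : String) :
    t.foldl pvAltStep (p, true) = (t.foldl pvWordF p, true) := by
  induction t generalizing p with
  | nil => simp
  | cons c t ih =>
      simp only [List.foldl_cons]
      rw [pvAltStep_letter_true p c (ht c (by simp))]
      exact ih (fun d hd => ht d (by simp [hd])) _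

theorem pvEncMot_eq (c : Char) (t : List Char) :
    encrypt_mot_numeriquement (c :: t) = t.foldl pvWordF (encrypt_lettre_numeriquement c) := by
  unfold encrypt_mot_numeriquement
  rw [PySem.List.foldl_pyRange_pyGetD' (c :: t) ' '
      (fun res d => res ++ "+" ++ encrypt_lettre_numeriquement d)
      (encrypt_lettre_numeriquement (PySem.List.pyGetD (c :: t) 0 ' ')) (a := 1) (by norm_num)]
  have h0 : PySem.List.pyGetD (c :: t) 0 ' ' = c := by
    simp [PySem.List.pyGetD, PySem.List.pyGet?, PySem.List.pyIdx?]
  rw [h0]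
  rfl

theorem pvFold_run (c : Char) (t : List Char)
    (hall : ∀ d ∈ c :: t, pvIsLetter d = true) (p : String) :
    (c :: t).foldl pvAltStep (p, false) = (p ++ encrypt_mot_numeriquement (c :: t), true) := by
  simp only [List.foldl_cons]
  rw [pvAltStep_letter_false p c (hall c (by simp))]
  rw [pvFold_letters t (fun d hd => hall d (by simp [hd])) _]
  rw [pvWordF_prefix, pvEncMot_eq]

theorem pvInnerA_spec (s : List Char) (mot : List Char) (count : Nat) (fuel : Nat)
    (hf : s.length - count < fuel) :
    pvInnerA s mot count fuel =
      (mot ++ (s.drop count).takeWhile pvIsLetter,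
       count + ((s.drop count).takeWhile pvIsLetter).length) := by
  induction fuel generalizing mot count with
  | zero => omega
  | succ fuel ih =>
    rw [pvInnerA]
    by_cases h : count < s.length ∧
        (('a' ≤ s.getD count ' ' ∧ s.getD count ' ' ≤ 'z') ∨
         ('A' ≤ s.getD count ' ' ∧ s.getD count ' ' ≤ 'Z'))
    · rw [if_pos h]
      have hlt : count < s.length := h.1
      have hd : s.drop count = s.getD count ' ' :: s.drop (count + 1) := by
        rw [List.getD_eq_getElem _ _ hlt]
        exact List.drop_eq_getElem_cons hlt
      have hlet : pvIsLetter (s.getD count ' ') = true := by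
        simp only [pvIsLetter, Bool.or_eq_true, decide_eq_true_eq]
        exact h.2
      rw [ih _ _ (by omega), hd, List.takeWhile_cons, hlet]
      apply Prod.ext <;> simp
      omega
    · rw [if_neg h]
      by_cases hlt : count < s.length
      · have hd : s.drop count = s.getD count ' ' :: s.drop (count + 1) := by
          rw [List.getD_eq_getElem _ _ hlt]
          exact List.drop_eq_getElem_cons hlt
        have hlet : pvIsLetter (s.getD count ' ') = false := by
          simp only [pvIsLetter, Bool.or_eq_false_iff, decide_eq_false_iff_not]
          constructor <;> (intro hc; exact h ⟨hlt, by tauto⟩)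
        rw [hd, List.takeWhile_cons, hlet]
        simp
      · have : s.drop count = [] := List.drop_eq_nil_of_le (by omega)
        rw [this]
        simp

theorem pvGetD_of_drop (s : List Char) (n : Nat) (d : Char) (t : List Char)
    (h : s.drop n = d :: t) : s.getD n ' ' = d := by
  have hn : n < s.length := by
    by_contra hc
    rw [List.drop_eq_nil_of_le (by omega)] at h
    cases h
  rw [List.getD_eq_getElem _ _ hn]
  have h2 := List.drop_eq_getElem_cons hn
  rw [h] at h2
  injection h2 with h1 _
  exact h1.symm

theorem pvAltStep_nonletter (p : String) (b : Bool) (d : Char) (h : pvIsLetter d = false) :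
    pvAltStep (p, b) d = (p ++ String.ofList [d], false) := by
  simp only [pvIsLetter, Bool.or_eq_false_iff, decide_eq_false_iff_not] at h
  simp [pvAltStep, h.1, h.2]

theorem pvFold_false (t : List Char) (P : String) :
    (t.foldl pvAltStep (P, false)).1 = P ++ pvAltL t := by
  have h := pvAltStep_prefix t P "" false
  rw [show (P ++ "" : String) = P from by simp] at h
  rw [h]
  rfl


theorem pvMain (s : List Char) (res : String) (count : Nat) (fuel : Nat)
    (hf : s.length + 1 - count ≤ fuel) :
    pvOuterA s res count fuel = res ++ pvAltL (s.drop count) := by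
  induction fuel generalizing res count with
  | zero =>
    rw [pvOuterA, List.drop_eq_nil_of_le (by omega)]
    simp [pvAltL]
  | succ fuel ih =>
    rw [pvOuterA]
    by_cases h : count ≤ s.length
    swap
    · rw [if_neg h, List.drop_eq_nil_of_le (by omega)]
      simp [pvAltL]
    rw [if_pos h]
    have hspec : pvInnerA s [] count (s.length + 1) =
        ((s.drop count).takeWhile pvIsLetter,
         count + ((s.drop count).takeWhile pvIsLetter).length) := by
      simpa using pvInnerA_spec s [] count (s.length + 1) (by omega)
    simp only [hspec]
    rw [ih _ _ (by omega)]
    have hsplit : (s.drop count).takeWhile pvIsLetter ++ (s.drop count).dropWhile pvIsLetter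
        = s.drop count := List.takeWhile_append_dropWhile
    have hall : ∀ c ∈ (s.drop count).takeWhile pvIsLetter, pvIsLetter c = true :=
      fun c hc => List.mem_takeWhile_imp hc
    have hlen : ((s.drop count).takeWhile pvIsLetter).length
        + ((s.drop count).dropWhile pvIsLetter).length = s.length - count := by
      rw [← List.length_append, hsplit, List.length_drop]
    have key : (s.drop count).drop ((s.drop count).takeWhile pvIsLetter).length
        = (s.drop count).dropWhile pvIsLetter := by
      nth_rewrite 2 [← (List.takeWhile_append_dropWhile (p := pvIsLetter) (l := s.drop count))]
      rw [List.drop_left]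
    have hdrop2 : s.drop (count + ((s.drop count).takeWhile pvIsLetter).length)
        = (s.drop count).dropWhile pvIsLetter := by
      rw [← List.drop_drop]
      exact key
    rcases hrun : (s.drop count).takeWhile pvIsLetter with _ | ⟨c, rt⟩
    · rw [hrun] at hall hlen hdrop2 hsplit
      simp only [List.nil_append, List.length_nil, Nat.zero_add] at hlen hdrop2 hsplit
      rcases hr' : (s.drop count).dropWhile pvIsLetter with _ | ⟨d, t⟩
    -- dead ends handled below
      · have hc : count = s.length := by
          have h0 : s.drop count = [] := by rw [← hsplit, hr']
          have := List.drop_eq_nil_iff.mp h0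
          omega
        simp only [List.length_nil]
        rw [if_neg (by omega), if_neg (by simp)]
        rw [List.drop_eq_nil_of_le (show s.length ≤ count + 0 + 1 by omega),
            List.drop_eq_nil_of_le (show s.length ≤ count by omega)]
      · have hdc : s.drop count = d :: t := by rw [← hsplit, hr']
        have hlt : count < s.length := by
          by_contra hc
          rw [List.drop_eq_nil_of_le (by omega)] at hdc
          cases hdc
        have hd : s.getD count ' ' = d := pvGetD_of_drop s count d t hdc
        have ht : s.drop (count + 1) = t := by
          have h1 : (s.drop count).drop 1 = t := by rw [hdc]; simp
          rw [List.drop_drop] at h1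
          exact h1
        have hdlet : pvIsLetter d = false := by
          have hne : (s.drop count).dropWhile pvIsLetter ≠ [] := by rw [hr']; simp
          have hh := List.head_dropWhile_not pvIsLetter hne
          simp only [hr', List.head_cons] at hh
          exact hh
        simp only [List.length_nil]
        rw [if_pos (by omega), if_neg (by simp)]
        rw [show count + 0 + 1 - 1 = count from by omega, hd,
            show count + 0 + 1 = count + 1 from by omega, ht]
        rw [hdc, pvAltL_cons_nonletter d t hdlet, String.append_assoc]
    · rw [hrun] at hall hlen hdrop2 hsplit
      rcases hr' : (s.drop count).dropWhile pvIsLetter with _ | ⟨d, t⟩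
      · rw [hr'] at hlen hdrop2 hsplit
        simp only [List.length_nil, Nat.add_zero, List.append_nil] at hlen hsplit
        rw [if_neg (by omega), if_pos (by simp)]
        rw [List.drop_eq_nil_of_le (show s.length ≤ count + (c :: rt).length + 1 by omega)]
        rw [← hsplit]
        have hA : pvAltL (c :: rt) = encrypt_mot_numeriquement (c :: rt) := by
          unfold pvAltL
          rw [pvFold_run c rt hall ""]
          simp
        rw [hA]
        simp [pvAltL]
      · rw [hr'] at hlen hdrop2
        simp only [List.length_cons] at hlen
        have hd : s.getD (count + (c :: rt).length) ' ' = d :=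
          pvGetD_of_drop s _ d t hdrop2
        have ht : s.drop (count + (c :: rt).length + 1) = t := by
          have h1 : (s.drop (count + (c :: rt).length)).drop 1 = t := by rw [hdrop2]; simp
          rw [List.drop_drop] at h1
          exact h1
        have hdlet : pvIsLetter d = false := by
          have hne : (s.drop count).dropWhile pvIsLetter ≠ [] := by rw [hr']; simp
          have hh := List.head_dropWhile_not pvIsLetter hne
          simp only [hr', List.head_cons] at hh
          exact hh
        rw [if_pos (by simp only [List.length_cons]; omega), if_pos (by simp)]
        rw [show count + (c :: rt).length + 1 - 1 = count + (c :: rt).length from by omega, hd, ht]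
        rw [← hsplit, hr']
        have hR : pvAltL ((c :: rt) ++ d :: t)
            = encrypt_mot_numeriquement (c :: rt) ++ (String.ofList [d] ++ pvAltL t) := by
          unfold pvAltL
          rw [List.foldl_append]
          rw [pvFold_run c rt hall ""]
          simp only [List.foldl_cons]
          rw [pvAltStep_nonletter _ true d hdlet]
          rw [pvFold_false]
          simp [pvAltL, String.append_assoc]
        rw [hR]
        simp [String.append_assoc]

-- ===== VERDICT (by name: the statement is the Claim_ definition above) =====
theorem encrypt_sentence_numeriquement_spec : Claim_equal_encrypt_sentence_numeriquement := by
  intro ch _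
  unfold Spec_encrypt_sentence_numeriquement encrypt_sentence_numeriquement
      encrypt_sentence_numeriquement_alt
  simpa [pvAltL] using pvMain ch.toList "" 0 (ch.toList.length + 1) (by omega)
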